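-- pv_equiv track=rewrite | github.com/Maxyleeee/RNA-Design | generate_with_starred_motif.py | decompose_helices
-- ===== SOURCE A (Python) =====
-- def decompose_helices(ss):
--     """
--     Programmatically logs coordinates representing topological RNA shapes.
--     Inputs:
--         ss: str - Secondary sequence geometry notation
--     Outputs:
--         tuple (dict, dict) - Identified helix indices mapping and total length map
--     """
--     p = []
--     res,H,C = {},{},{}
--     for i,c in enumerate(ss):
--         if c=="(":
--             p.append(i)
--         elif c== ")":
--             j = p.pop()
--             a,b = j,i
--             ii,jj = a+1,b-1
--             if (ii,jj) in res:
--                 hid = res[(ii,jj)]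
--                 res[(a,b)] = hid
--                 C[hid] += 1
--             else:
--                 hid = 1+len(H)
--                 res[(a,b)] = hid
--                 H[hid] = (a,b)
--                 C[hid] = 1
--     return H,C
-- ===== SOURCE B (Python) =====
-- def decompose_helices(ss):
--     # Two passes, no pair->helix dictionary: first match all pairs with a stack;
--     # then scan pairs in closing order.  Because closing indices are strictly
--     # increasing, a pair (a, b) can stack on (a+1, b-1) only if that was the
--     # immediately previously closed pair, so remembering just the last closed
--     # pair and its helix id replaces A's res dictionary.
--     stack, pairs = [], []
--     for i, c in enumerate(ss):
--         if c == '(':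
--             stack.append(i)
--         elif c == ')':
--             pairs.append((stack.pop(), i))
--     H, C = {}, {}
--     prev = None  # (last closed pair, its helix id)
--     for a, b in pairs:
--         if prev is not None and prev[0] == (a + 1, b - 1):
--             hid = prev[1]
--             C[hid] += 1
--         else:
--             hid = len(H) + 1
--             H[hid] = (a, b)
--             C[hid] = 1
--         prev = ((a, b), hid)
--     return H, C
-- ===== Notes on version B (the rewrite author's own statement) =====
-- stated objective: alternative
-- what changed: Replaced A's interleaved matching+grouping loop with a pair->helix dictionary (res) by two passes: a stack pass that lists matched pairs in closing order, then a scan that keeps only the last closed pair and its helix id, using the fact that a pair can stack only on the immediately previously closed pair.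
import Mathlib
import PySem

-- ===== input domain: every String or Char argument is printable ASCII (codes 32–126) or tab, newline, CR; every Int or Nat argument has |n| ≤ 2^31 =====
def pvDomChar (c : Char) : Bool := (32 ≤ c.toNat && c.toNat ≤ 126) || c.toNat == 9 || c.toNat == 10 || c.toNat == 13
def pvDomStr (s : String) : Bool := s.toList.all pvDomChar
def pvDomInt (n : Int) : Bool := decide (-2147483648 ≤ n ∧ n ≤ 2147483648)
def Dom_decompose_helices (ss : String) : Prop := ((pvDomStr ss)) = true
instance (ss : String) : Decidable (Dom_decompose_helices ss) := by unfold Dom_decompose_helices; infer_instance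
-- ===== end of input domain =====

-- B drops A's pair->helix dictionary: it matches pairs with a stack first, then groups
-- them in closing order remembering only the last closed pair and its helix id.


-- ===== PORT A =====
def decompose_helices (ss : String) : (List (Int × Int × Int)) × (List (Int × Int)) :=
  let fin := (PySem.List.enumerate ss.toList).foldl
    (fun (st : List Int × PySem.Dict (Int × Int) Int × PySem.Dict Int (Int × Int) × PySem.Dict Int Int)
         (ic : Int × Char) =>
      let (p, res, H, C) := st
      let (i, c) := ic
      if c = '(' then (p ++ [i], res, H, C)
      else if c = ')' then
        match PySem.List.pop? p (-1) with
        | none => (p, res, H, C)  -- Python raises IndexError here; excluded by Pre_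
        | some (j, p') =>
          let a := j; let b := i
          match res.get? (a + 1, b - 1) with
          | some hid => (p', res.insert (a, b) hid, H, C.modify hid 0 (· + 1))
          | none =>
            let hid : Int := 1 + (H.size : Int)
            (p', res.insert (a, b) hid, H.insert hid (a, b), C.insert hid 1)
      else (p, res, H, C))
    ([], PySem.Dict.empty, PySem.Dict.empty, PySem.Dict.empty)
  (fin.2.2.1.items, fin.2.2.2.items)

-- ===== PORT B =====
def decompose_helices_alt (ss : String) : (List (Int × Int × Int)) × (List (Int × Int)) :=
  let st := (PySem.List.enumerate ss.toList).foldl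
    (fun (st : List Int × List (Int × Int)) (ic : Int × Char) =>
      let (stack, pairs) := st
      let (i, c) := ic
      if c = '(' then (stack ++ [i], pairs)
      else if c = ')' then
        match PySem.List.pop? stack (-1) with
        | none => (stack, pairs)  -- Python raises IndexError here; excluded by Pre_
        | some (j, stack') => (stack', pairs ++ [(j, i)])
      else (stack, pairs))
    ([], [])
  let fin := st.2.foldl
    (fun (st : PySem.Dict Int (Int × Int) × PySem.Dict Int Int × Option ((Int × Int) × Int))
         (ab : Int × Int) =>
      let (H, C, prev) := st
      let (a, b) := ab
      match prev with
      | some (pq, ph) =>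
        if pq = (a + 1, b - 1) then (H, C.modify ph 0 (· + 1), some ((a, b), ph))
        else
          let hid : Int := (H.size : Int) + 1
          (H.insert hid (a, b), C.insert hid 1, some ((a, b), hid))
      | none =>
        let hid : Int := (H.size : Int) + 1
        (H.insert hid (a, b), C.insert hid 1, some ((a, b), hid)))
    (PySem.Dict.empty, PySem.Dict.empty, none)
  (fin.1.items, fin.2.1.items)

-- ===== PRECONDITION & SPEC =====
-- Pre_ excludes exactly the inputs where Python A raises IndexError (a ')' with no
-- unmatched '(' before it, i.e. some prefix has more ')' than '('); Python B raises there too.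
def Pre_decompose_helices (ss : String) : Prop :=
  ∀ n < ss.toList.length,
    (ss.toList.take (n + 1)).count ')' ≤ (ss.toList.take (n + 1)).count '('
instance (ss : String) : Decidable (Pre_decompose_helices ss) := by
  unfold Pre_decompose_helices; infer_instance

def pvWitness_decompose_helices : String := "((.))"

def Spec_decompose_helices (ss : String) (out : (List (Int × Int × Int)) × (List (Int × Int))) : Prop := out = decompose_helices_alt ss
instance (ss : String) (out : (List (Int × Int × Int)) × (List (Int × Int))) : Decidable (Spec_decompose_helices ss out) := by unfold Spec_decompose_helices; infer_instance

-- ===== CLAIM (what is proved, stated in full; the proofs are below) =====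
def Claim_equal_decompose_helices : Prop := ∀ (ss : String), Dom_decompose_helices ss → Pre_decompose_helices ss → Spec_decompose_helices ss (decompose_helices ss)

-- ===== LEMMAS AND PROOFS =====

-- Proof-side helpers ---------------------------------------------------------

-- The pair-processing part of A's loop body (the state without the stack).
def pvStepPair (t : PySem.Dict (Int × Int) Int × PySem.Dict Int (Int × Int) × PySem.Dict Int Int)
    (ab : Int × Int) :
    PySem.Dict (Int × Int) Int × PySem.Dict Int (Int × Int) × PySem.Dict Int Int :=
  let (res, H, C) := t
  let (a, b) := ab
  match res.get? (a + 1, b - 1) with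
  | some hid => (res.insert (a, b) hid, H, C.modify hid 0 (· + 1))
  | none =>
    let hid : Int := 1 + (H.size : Int)
    (res.insert (a, b) hid, H.insert hid (a, b), C.insert hid 1)

-- B's grouping-loop body.
def pvStepB (st : PySem.Dict Int (Int × Int) × PySem.Dict Int Int × Option ((Int × Int) × Int))
    (ab : Int × Int) :
    PySem.Dict Int (Int × Int) × PySem.Dict Int Int × Option ((Int × Int) × Int) :=
  let (H, C, prev) := st
  let (a, b) := ab
  match prev with
  | some (pq, ph) =>
    if pq = (a + 1, b - 1) then (H, C.modify ph 0 (· + 1), some ((a, b), ph))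
    else
      let hid : Int := (H.size : Int) + 1
      (H.insert hid (a, b), C.insert hid 1, some ((a, b), hid))
  | none =>
    let hid : Int := (H.size : Int) + 1
    (H.insert hid (a, b), C.insert hid 1, some ((a, b), hid))

-- The matched pairs, in closing order, produced from stack p by the char list l.
def pvPairsOf : List (Int × Char) → List Int → List (Int × Int)
  | [], _ => []
  | (i, c) :: l, p =>
    if c = '(' then pvPairsOf l (p ++ [i])
    else if c = ')' then
      match PySem.List.pop? p (-1) with
      | none => pvPairsOf l p
      | some (j, p') => (j, i) :: pvPairsOf l p'
    else pvPairsOf l p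

theorem pv_fuse_B : ∀ (l : List (Int × Char)) (p : List Int) (ps : List (Int × Int)),
    (l.foldl (fun (st : List Int × List (Int × Int)) (ic : Int × Char) =>
      let (stack, pairs) := st
      let (i, c) := ic
      if c = '(' then (stack ++ [i], pairs)
      else if c = ')' then
        match PySem.List.pop? stack (-1) with
        | none => (stack, pairs)
        | some (j, stack') => (stack', pairs ++ [(j, i)])
      else (stack, pairs)) (p, ps)).2 = ps ++ pvPairsOf l p := by
  intro l
  induction l with
  | nil => intro p ps; simp [pvPairsOf]
  | cons ic l ih =>
    intro p ps
    obtain ⟨i, c⟩ := ic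
    simp only [List.foldl_cons, pvPairsOf]
    by_cases h1 : c = '('
    · simp [h1, ih]
    · by_cases h2 : c = ')'
      · simp only [h2, if_true]
        cases hp : PySem.List.pop? p (-1) with
        | none => simp [ih]
        | some jp =>
          obtain ⟨j, p'⟩ := jp
          simp [ih]
      · simp [h1, h2, ih]

theorem pv_fuse_A : ∀ (l : List (Int × Char)) (p : List Int)
    (t : PySem.Dict (Int × Int) Int × PySem.Dict Int (Int × Int) × PySem.Dict Int Int),
    (l.foldl (fun (st : List Int × PySem.Dict (Int × Int) Int × PySem.Dict Int (Int × Int) × PySem.Dict Int Int)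
         (ic : Int × Char) =>
      let (p, res, H, C) := st
      let (i, c) := ic
      if c = '(' then (p ++ [i], res, H, C)
      else if c = ')' then
        match PySem.List.pop? p (-1) with
        | none => (p, res, H, C)
        | some (j, p') =>
          let a := j; let b := i
          match res.get? (a + 1, b - 1) with
          | some hid => (p', res.insert (a, b) hid, H, C.modify hid 0 (· + 1))
          | none =>
            let hid : Int := 1 + (H.size : Int)
            (p', res.insert (a, b) hid, H.insert hid (a, b), C.insert hid 1)
      else (p, res, H, C)) (p, t)).2
    = (pvPairsOf l p).foldl pvStepPair t := by
  intro l
  induction l with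
  | nil => intro p t; simp [pvPairsOf]
  | cons ic l ih =>
    intro p t
    obtain ⟨i, c⟩ := ic
    obtain ⟨res, H, C⟩ := t
    simp only [List.foldl_cons, pvPairsOf]
    by_cases h1 : c = '('
    · simp [h1, ih]
    · by_cases h2 : c = ')'
      · simp only [h2, if_true]
        cases hp : PySem.List.pop? p (-1) with
        | none => simp [ih]
        | some jp =>
          obtain ⟨j, p'⟩ := jp
          cases hr : res.get? (j + 1, i - 1) with
          | none => simp [ih, pvStepPair, hr]
          | some hid => simp [ih, pvStepPair, hr]
      · simp [h1, h2, ih]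

-- every produced closing index comes from the char list
theorem pv_pairs_mem : ∀ (l : List (Int × Char)) (p : List Int) (q : Int × Int),
    q ∈ pvPairsOf l p → ∃ ic ∈ l, q.2 = ic.1 := by
  intro l
  induction l with
  | nil => intro p q h; simp [pvPairsOf] at h
  | cons ic l ih =>
    intro p q h
    obtain ⟨i, c⟩ := ic
    simp only [pvPairsOf] at h
    by_cases h1 : c = '('
    · rw [if_pos h1] at h
      obtain ⟨jc, hm, he⟩ := ih _ _ h
      exact ⟨jc, by simp [hm], he⟩
    · rw [if_neg h1] at h
      by_cases h2 : c = ')'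
      · rw [if_pos h2] at h
        cases hp : PySem.List.pop? p (-1) with
        | none =>
          rw [hp] at h
          obtain ⟨jc, hm, he⟩ := ih _ _ h
          exact ⟨jc, by simp [hm], he⟩
        | some jp =>
          obtain ⟨j, p'⟩ := jp
          rw [hp] at h
          rcases List.mem_cons.mp h with rfl | h
          · exact ⟨(i, c), by simp, rfl⟩
          · obtain ⟨jc, hm, he⟩ := ih _ _ h
            exact ⟨jc, by simp [hm], he⟩
      · rw [if_neg h2] at h
        obtain ⟨jc, hm, he⟩ := ih _ _ h
        exact ⟨jc, by simp [hm], he⟩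

-- closing indices of produced pairs are strictly increasing
theorem pv_pairs_sorted : ∀ (l : List (Int × Char)) (p : List Int),
    l.Pairwise (fun x y => x.1 < y.1) →
    (pvPairsOf l p).Pairwise (fun x y : Int × Int => x.2 < y.2) := by
  intro l
  induction l with
  | nil => intro p _; simp [pvPairsOf]
  | cons ic l ih =>
    intro p hpw
    obtain ⟨i, c⟩ := ic
    rw [List.pairwise_cons] at hpw
    simp only [pvPairsOf]
    by_cases h1 : c = '('
    · rw [if_pos h1]; exact ih _ hpw.2
    · rw [if_neg h1]
      by_cases h2 : c = ')'
      · rw [if_pos h2]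
        cases hp : PySem.List.pop? p (-1) with
        | none => exact ih _ hpw.2
        | some jp =>
          obtain ⟨j, p'⟩ := jp
          rw [List.pairwise_cons]
          constructor
          · intro q hq
            obtain ⟨jc, hm, he⟩ := pv_pairs_mem _ _ _ hq
            show (j, i).2 < q.2
            rw [he]
            exact hpw.1 jc hm
          · exact ih _ hpw.2
      · rw [if_neg h2]; exact ih _ hpw.2

theorem pv_lockstep : ∀ (ps ts : List (Int × Int))
    (res : PySem.Dict (Int × Int) Int)
    (H : PySem.Dict Int (Int × Int)) (C : PySem.Dict Int Int)
    (prev : Option ((Int × Int) × Int)),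
    (ts ++ ps).Pairwise (fun x y : Int × Int => x.2 < y.2) →
    (∀ k, (res.get? k).isSome ↔ k ∈ ts) →
    (∀ pq ph, prev = some (pq, ph) → (∃ ts', ts = ts' ++ [pq]) ∧ res.get? pq = some ph) →
    (prev = none → ts = []) →
    (ps.foldl pvStepPair (res, H, C)).2.1 = (ps.foldl pvStepB (H, C, prev)).1 ∧
    (ps.foldl pvStepPair (res, H, C)).2.2 = (ps.foldl pvStepB (H, C, prev)).2.1 := by
  intro ps
  induction ps with
  | nil => intro ts res H C prev _ _ _ _; exact ⟨rfl, rfl⟩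
  | cons q rest ih =>
    intro ts res H C prev hsort h1 h2 h2n
    obtain ⟨a, b⟩ := q
    have hcross : ∀ x ∈ ts, x.2 < b := by
      intro x hx
      exact (List.pairwise_append.mp hsort).2.2 x hx (a, b) (List.mem_cons_self ..)
    have hsort' : ((ts ++ [(a, b)]) ++ rest).Pairwise (fun x y : Int × Int => x.2 < y.2) := by
      rw [List.append_assoc]; simpa using hsort
    simp only [List.foldl_cons]
    cases hr : res.get? (a + 1, b - 1) with
    | some hid =>
      have hmem : (a + 1, b - 1) ∈ ts := (h1 _).mp (by simp [hr])
      cases hprev : prev with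
      | none => exact absurd hmem (by simp [h2n hprev])
      | some pp =>
        obtain ⟨pq, ph⟩ := pp
        obtain ⟨⟨ts', hts⟩, hres⟩ := h2 pq ph hprev
        have hpq : pq = (a + 1, b - 1) := by
          subst hts
          rcases List.mem_append.mp hmem with hin | hin
          · exfalso
            have hpw : (ts' ++ [pq]).Pairwise (fun x y : Int × Int => x.2 < y.2) :=
              (List.pairwise_append.mp hsort).1
            have h3 := (List.pairwise_append.mp hpw).2.2 _ hin pq (by simp)
            have h4 : pq.2 < b := hcross pq (by simp)
            simp only [] at h3
            omega
          · have : (a + 1, b - 1) = pq := by simpa using hin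
            exact this.symm
        have hph : ph = hid := by
          rw [hpq, hr] at hres
          exact (Option.some.inj hres).symm
        have eA : pvStepPair (res, H, C) (a, b)
            = (res.insert (a, b) hid, H, C.modify hid 0 (· + 1)) := by
          simp [pvStepPair, hr]
        have eB : pvStepB (H, C, some (pq, ph)) (a, b)
            = (H, C.modify hid 0 (· + 1), some ((a, b), hid)) := by
          simp [pvStepB, hpq, hph]
        rw [eA, eB]
        apply ih (ts ++ [(a, b)]) _ _ _ _ hsort'
        · intro k
          rw [PySem.Dict.get?_insert]
          by_cases hk : k = (a, b) <;> simp [hk, h1 k]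
        · intro pq' ph' he
          have he' : (a, b) = pq' ∧ hid = ph' := by simpa using he
          refine ⟨⟨ts, by rw [← he'.1]⟩, ?_⟩
          rw [← he'.1, ← he'.2]
          simp [PySem.Dict.get?_insert_self]
        · intro h; cases h
    | none =>
      have hnm : (a + 1, b - 1) ∉ ts := by
        intro hm
        have := (h1 _).mpr hm
        rw [hr] at this
        simp at this
      have hco : ((H.size : Int) + 1) = (1 + (H.size : Int)) := by omega
      have eA : pvStepPair (res, H, C) (a, b)
          = (res.insert (a, b) (1 + (H.size : Int)),
             H.insert (1 + (H.size : Int)) (a, b), C.insert (1 + (H.size : Int)) 1) := by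
        simp [pvStepPair, hr]
      have eB : pvStepB (H, C, prev) (a, b)
          = (H.insert (1 + (H.size : Int)) (a, b), C.insert (1 + (H.size : Int)) 1,
             some ((a, b), 1 + (H.size : Int))) := by
        cases hprev : prev with
        | none => simp [pvStepB, hco]
        | some pp =>
          obtain ⟨pq, ph⟩ := pp
          have hne : pq ≠ (a + 1, b - 1) := by
            intro hq
            apply hnm
            rw [← hq]
            obtain ⟨⟨ts', hts⟩, _⟩ := h2 pq ph hprev
            rw [hts]; simp
          simp [pvStepB, hne, hco]
      rw [eA, eB]
      apply ih (ts ++ [(a, b)]) _ _ _ _ hsort'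
      · intro k
        rw [PySem.Dict.get?_insert]
        by_cases hk : k = (a, b) <;> simp [hk, h1 k]
      · intro pq' ph' he
        have he' : (a, b) = pq' ∧ 1 + (H.size : Int) = ph' := by simpa using he
        refine ⟨⟨ts, by rw [he'.1]⟩, ?_⟩
        rw [← he'.1, ← he'.2]
        exact PySem.Dict.get?_insert_self _ _ _
      · intro h; cases h

-- ===== VERDICT (by name: the statement is the Claim_ definition above) =====
theorem decompose_helices_spec : Claim_equal_decompose_helices := by
  intro ss _ _
  unfold Spec_decompose_helices
  have hA := pv_fuse_A (PySem.List.enumerate ss.toList) []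
    (PySem.Dict.empty, PySem.Dict.empty, PySem.Dict.empty)
  have hB := pv_fuse_B (PySem.List.enumerate ss.toList) [] []
  have hsorted : (pvPairsOf (PySem.List.enumerate ss.toList) []).Pairwise
      (fun x y : Int × Int => x.2 < y.2) :=
    pv_pairs_sorted _ _ (PySem.List.pairwise_lt_enumerate ss.toList 0)
  have hlock := pv_lockstep (pvPairsOf (PySem.List.enumerate ss.toList) []) []
    PySem.Dict.empty PySem.Dict.empty PySem.Dict.empty none
    (by simpa using hsorted)
    (by intro k; simp [PySem.Dict.get?_empty])
    (by intro pq ph h; cases h)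
    (fun _ => rfl)
  simp only [decompose_helices, decompose_helices_alt]
  rw [hA, hB]
  simp only [List.nil_append]
  rw [hlock.1, hlock.2]
  rfl
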